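-- pv_equiv track=rewrite | github.com/snxoxopy/algorithm_boj | 프로그래머스/lv3/64064. 불량 사용자/불량 사용자.py | solution
-- ===== SOURCE A (Python) =====
-- def solution(user_id, banned_id):
--     answer = 0
--     len_u, len_b = len(user_id), len(banned_id)
--
--     # DFS
--     lst = []
--
--     def masking(uid):
--         cnt = 0
--         visited = [0] * len_b
--         for i in range(len(uid)):
--             str_user = uid[i]
--             flag = 0
--             for j in range(len_b):
--                 str_ban = banned_id[j]
--                 if len(str_user) == len(str_ban):
--                     flag = 1
--                     for k in range(len(str_ban)):
--                         if str_ban[k] != '*' and str_ban[k] != str_user[k]: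
--                             flag = 0
--                             break
--                     if flag and not visited[j]:
--                         visited[j] = 1
--                         cnt += 1
--                         break
--                 else: continue
--
--         return cnt
--
--     set_answer = set()
--     def dfs(depth):
--         if len(lst) == len_b:
--             if masking(lst) == len_b:
--                 ver = sorted(lst)
--                 set_answer.add(tuple(ver))
--                 return set_answer
--         else:
--             for i in range(len_u):
--                 if user_id[i] not in lst:
--                     lst.append(user_id[i])
--                     dfs(depth + 1)
--                     lst.pop()
--     # main
--     dfs(0)
--
--     answer = len(set_answer)
--     return answer
-- ===== SOURCE B (Python) =====
-- def solution(user_id, banned_id):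
--     # ordered dedup of users (A's DFS never repeats a user VALUE)
--     users = []
--     for u in user_id:
--         if u not in users:
--             users.append(u)
--
--     def matches(u, b):
--         if len(u) != len(b):
--             return False
--         for uc, bc in zip(u, b):
--             if bc != '*' and bc != uc:
--                 return False
--         return True
--
--     # candidates per banned pattern, then DFS assigning one distinct user per pattern
--     cand = [[u for u in users if matches(u, b)] for b in banned_id]
--
--     found = set()
--     def pick(j, chosen):
--         if j == len(banned_id):
--             found.add(tuple(sorted(chosen)))
--             return
--         for u in cand[j]:
--             if u not in chosen:
--                 pick(j + 1, chosen + [u])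
--     pick(0, [])
--     return len(found)
-- ===== Notes on version B (the rewrite author's own statement) =====
-- stated objective: alternative
-- what changed: A enumerates every permutation of distinct user_id values of length len(banned_id) and re-runs a greedy matcher on each; B precomputes the candidate users for each banned pattern and DFSes over the patterns assigning one distinct candidate each, collecting the distinct sorted tuples (intended as faster; a timing run saw A time out at n=16 where B returned but could not verify a ratio, so no speed is claimed).
import Mathlib
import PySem

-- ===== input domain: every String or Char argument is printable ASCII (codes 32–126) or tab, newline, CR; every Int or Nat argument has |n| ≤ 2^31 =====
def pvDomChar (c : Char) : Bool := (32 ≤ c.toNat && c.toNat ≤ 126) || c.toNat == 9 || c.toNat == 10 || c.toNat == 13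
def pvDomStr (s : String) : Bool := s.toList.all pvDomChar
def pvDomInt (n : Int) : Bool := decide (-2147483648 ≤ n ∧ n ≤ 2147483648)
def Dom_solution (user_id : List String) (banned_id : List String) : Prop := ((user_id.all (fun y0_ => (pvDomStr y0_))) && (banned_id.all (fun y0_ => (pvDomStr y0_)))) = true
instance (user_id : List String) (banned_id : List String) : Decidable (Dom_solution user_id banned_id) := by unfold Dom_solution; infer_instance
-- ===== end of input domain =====

-- B replaces A's DFS over ALL permutations of user_id (with a greedy re-matching of every
-- permutation against banned_id) by a per-pattern DFS over precomputed candidate users;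
-- objective: alternative, intended as faster (a timing run saw A time out at n=16 where
-- B returned, but could not measure a ratio, so no speed is claimed).

-- ===== PORT A =====
-- the k-loop of masking: character-wise wildcard check (call sites guarantee equal lengths)
def maskFlagA : List Char → List Char → Bool
  | [], _ => true
  | _ :: _, [] => true
  | b :: bs, u :: us => if b ≠ '*' ∧ b ≠ u then false else maskFlagA bs us

-- the j-loop of masking: scan for the first matching unvisited pattern, mark it, break;
-- visited[j] is kept zipped with its pattern
def scanA (u : List Char) : List (List Char × Bool) → List (List Char × Bool) × Bool
  | [] => ([], false)
  | (b, v) :: rest =>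
    if u.length = b.length ∧ maskFlagA b u = true ∧ v = false then ((b, true) :: rest, true)
    else
      let r := scanA u rest
      ((b, v) :: r.1, r.2)

-- masking(uid): fold the i-loop over uid; state = (patterns zipped with visited, cnt)
def maskingA (banned : List String) (uid : List String) : Int :=
  (uid.foldl
    (fun st s =>
      let r := scanA s.toList st.1
      (r.1, st.2 + if r.2 then 1 else 0))
    (banned.map (fun b => (b.toList, false)), (0 : Int))).2

-- dfs(depth): lst is the explicit list state, acc is set_answer; fuel = one more than the
-- remaining recursion depth (the Python recursion is bounded by len(banned_id)); fuel 0 is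
-- a totality guard never reached from `solution`
def dfsA (user banned : List String) : Nat → List String → PySem.Set (List String) → PySem.Set (List String)
  | 0, _, acc => acc
  | fuel + 1, lst, acc =>
    if lst.length = banned.length then
      if maskingA banned lst = (banned.length : Int) then
        PySem.Set.add acc (PySem.List.sorted lst (fun y => y) false)
      else acc
    else
      user.foldl (fun acc u => if u ∈ lst then acc else dfsA user banned fuel (lst ++ [u]) acc) acc

def solution (user_id : List String) (banned_id : List String) : Int :=
  PySem.Set.len (dfsA user_id banned_id (banned_id.length + 1) [] PySem.Set.empty)

-- ===== PORT B =====
-- matches(u, b): length check then char-by-char scan with early False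
def matchesB (u b : List Char) : Bool :=
  if u.length ≠ b.length then false
  else (u.zip b).all (fun p => decide (p.2 = '*') || decide (p.2 = p.1))

-- Source B's ordered dedup loop `if u not in users: users.append(u)` is exactly PySem.Set.ofList
def usersB (user_id : List String) : List String := PySem.Set.ofList user_id

-- pick(j, chosen): structural recursion over the remaining candidate lists
def pickB : List (List String) → List String → PySem.Set (List String) → PySem.Set (List String)
  | [], chosen, acc => PySem.Set.add acc (PySem.List.sorted chosen (fun y => y) false)
  | c :: cs, chosen, acc =>
    c.foldl (fun acc u => if u ∈ chosen then acc else pickB cs (chosen ++ [u]) acc) acc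

def solution_alt (user_id : List String) (banned_id : List String) : Int :=
  let users := usersB user_id
  let cand := banned_id.map (fun b => users.filter (fun u => matchesB u.toList b.toList))
  PySem.Set.len (pickB cand [] PySem.Set.empty)

-- ===== PRECONDITION & SPEC =====
def Spec_solution (user_id : List String) (banned_id : List String) (out : Int) : Prop := out = solution_alt user_id banned_id
instance (user_id : List String) (banned_id : List String) (out : Int) : Decidable (Spec_solution user_id banned_id out) := by unfold Spec_solution; infer_instance

-- ===== CLAIM (what is proved, stated in full; the proofs are below) =====
def Claim_equal_solution : Prop := ∀ (user_id : List String) (banned_id : List String), Dom_solution user_id banned_id → Spec_solution user_id banned_id (solution user_id banned_id)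

-- ===== LEMMAS AND PROOFS =====

-- `CM b u` : user chars u match pattern chars b (equal length, '*' wildcard)
def CM (b u : List Char) : Prop := u.length = b.length ∧ maskFlagA b u = true

-- the sequences reachable from `lst` by A's dfs loop (append a fresh user value)
inductive ExtR (user : List String) : List String → List String → Prop
  | refl (l : List String) : ExtR user l l
  | step {lst l : List String} {u : String} (hu : u ∈ user) (hn : u ∉ lst)
      (h : ExtR user (lst ++ [u]) l) : ExtR user lst l

-- the sequences produced by B's pick: one fresh user from each candidate list in order
inductive PickR : List (List String) → List String → List String → Prop
  | nil (chosen : List String) : PickR [] chosen chosen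
  | cons {c : List String} {cs : List (List String)} {chosen l : List String} {u : String}
      (hu : u ∈ c) (hn : u ∉ chosen) (h : PickR cs (chosen ++ [u]) l) : PickR (c :: cs) chosen l

lemma zip_all_eq_maskFlagA : ∀ (u b : List Char), u.length = b.length →
    (u.zip b).all (fun p => decide (p.2 = '*') || decide (p.2 = p.1)) = maskFlagA b u
  | [], [], _ => rfl
  | c :: us, d :: bs, h => by
    simp only [List.zip_cons_cons, List.all_cons, maskFlagA]
    rw [zip_all_eq_maskFlagA us bs (by simpa using h)]
    by_cases h1 : d = '*' <;> by_cases h2 : d = c <;> simp [h1, h2]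

lemma matchesB_iff (u b : List Char) : matchesB u b = true ↔ CM b u := by
  unfold matchesB CM
  by_cases h : u.length = b.length
  · simp [h, zip_all_eq_maskFlagA u b h]
  · simp [h]

lemma nodup_iff_take (l : List String) : l.Nodup ↔ ∀ i (h : i < l.length), l[i] ∉ l.take i := by
  induction l with
  | nil => simp
  | cons a l ih =>
    simp only [List.nodup_cons, ih]
    constructor
    · rintro ⟨ha, h⟩ i hi
      match i with
      | 0 => simp
      | i + 1 =>
        simp only [List.getElem_cons_succ, List.take_succ_cons, List.mem_cons]
        push Not
        refine ⟨fun he => ha (he ▸ List.getElem_mem _), h i (by simpa using hi)⟩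
    · intro h
      constructor
      · intro hmem
        obtain ⟨i, hi, rfl⟩ := List.mem_iff_getElem.mp hmem
        have := h (i + 1) (by simpa using hi)
        simp only [List.getElem_cons_succ, List.take_succ_cons, List.mem_cons] at this
        exact this (Or.inl trivial)
      · intro i hi
        have := h (i + 1) (by simpa using hi)
        simp only [List.getElem_cons_succ, List.take_succ_cons, List.mem_cons] at this
        push Not at this
        exact this.2

lemma mem_pickB (cs : List (List String)) : ∀ (chosen : List String)
    (acc : PySem.Set (List String)) (x : List String),
    x ∈ pickB cs chosen acc ↔
      x ∈ acc ∨ ∃ l, PickR cs chosen l ∧ x = PySem.List.sorted l (fun y => y) false := by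
  induction cs with
  | nil =>
    intro chosen acc x
    simp only [pickB, PySem.Set.mem_add]
    constructor
    · rintro (h | h)
      · exact Or.inl h
      · exact Or.inr ⟨chosen, PickR.nil chosen, h⟩
    · rintro (h | ⟨l, hp, hx⟩)
      · exact Or.inl h
      · cases hp; exact Or.inr hx
  | cons c cs IH =>
    intro chosen acc x
    have inner : ∀ (cl : List String) (acc : PySem.Set (List String)),
        x ∈ cl.foldl (fun acc u => if u ∈ chosen then acc else pickB cs (chosen ++ [u]) acc) acc ↔
        x ∈ acc ∨ ∃ u ∈ cl, u ∉ chosen ∧ ∃ l, PickR cs (chosen ++ [u]) l ∧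
          x = PySem.List.sorted l (fun y => y) false := by
      intro cl
      induction cl with
      | nil => intro acc; simp
      | cons u cl' IH2 =>
        intro acc
        simp only [List.foldl_cons, IH2]
        by_cases hu : u ∈ chosen
        · simp only [if_pos hu]
          constructor
          · rintro (h | ⟨u', hu', h'⟩)
            · exact Or.inl h
            · exact Or.inr ⟨u', List.mem_cons_of_mem _ hu', h'⟩
          · rintro (h | ⟨u', hu', hn', h'⟩)
            · exact Or.inl h
            · rcases List.mem_cons.mp hu' with rfl | hm
              · exact absurd hu hn'
              · exact Or.inr ⟨u', hm, hn', h'⟩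
        · rw [if_neg hu, IH (chosen ++ [u]) acc x]
          constructor
          · rintro ((h | ⟨l, hp, hx⟩) | ⟨u', hu', h'⟩)
            · exact Or.inl h
            · exact Or.inr ⟨u, List.mem_cons_self, hu, l, hp, hx⟩
            · exact Or.inr ⟨u', List.mem_cons_of_mem _ hu', h'⟩
          · rintro (h | ⟨u', hu', hn', l, hp, hx⟩)
            · exact Or.inl (Or.inl h)
            · rcases List.mem_cons.mp hu' with rfl | hm
              · exact Or.inl (Or.inr ⟨l, hp, hx⟩)
              · exact Or.inr ⟨u', hm, hn', l, hp, hx⟩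
    rw [show pickB (c :: cs) chosen acc =
      c.foldl (fun acc u => if u ∈ chosen then acc else pickB cs (chosen ++ [u]) acc) acc from rfl,
      inner c acc]
    constructor
    · rintro (h | ⟨u, hu, hn, l, hp, hx⟩)
      · exact Or.inl h
      · exact Or.inr ⟨l, PickR.cons hu hn hp, hx⟩
    · rintro (h | ⟨l, hp, hx⟩)
      · exact Or.inl h
      · cases hp with
        | cons hu hn h' => exact Or.inr ⟨_, hu, hn, _, h', hx⟩

lemma nodup_pickB (cs : List (List String)) : ∀ (chosen : List String)
    (acc : PySem.Set (List String)), acc.Nodup → (pickB cs chosen acc).Nodup := by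
  induction cs with
  | nil => intro chosen acc h; exact PySem.Set.nodup_add _ _ h
  | cons c cs IH =>
    intro chosen acc h
    show (c.foldl (fun acc u => if u ∈ chosen then acc else pickB cs (chosen ++ [u]) acc) acc).Nodup
    induction c generalizing acc with
    | nil => exact h
    | cons u c' IH2 =>
      simp only [List.foldl_cons]
      apply IH2
      split
      · exact h
      · exact IH _ _ h

lemma extR_length {user lst l : List String} (h : ExtR user lst l) : lst.length ≤ l.length ∧ (l.length = lst.length → l = lst) := by
  induction h with
  | refl => exact ⟨le_rfl, fun _ => rfl⟩
  | step hu hn h ih =>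
    simp only [List.length_append, List.length_cons, List.length_nil] at ih
    exact ⟨by omega, fun he => by omega⟩

lemma mem_dfsA (user banned : List String) :
    ∀ (fuel : Nat) (lst : List String) (acc : PySem.Set (List String)) (x : List String),
    banned.length + 1 ≤ fuel + lst.length → lst.length ≤ banned.length →
    (x ∈ dfsA user banned fuel lst acc ↔
      x ∈ acc ∨ ∃ l, ExtR user lst l ∧ l.length = banned.length ∧
        maskingA banned l = (banned.length : Int) ∧
        x = PySem.List.sorted l (fun y => y) false) := by
  intro fuel
  induction fuel with
  | zero => intro lst acc x h1 h2; omega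
  | succ fuel IH =>
    intro lst acc x h1 h2
    by_cases hb : lst.length = banned.length
    · show x ∈ (if lst.length = banned.length then _ else _) ↔ _
      rw [if_pos hb]
      have hext : ∀ l, ExtR user lst l → l.length = banned.length → l = lst := by
        intro l hl he
        exact (extR_length hl).2 (by omega)
      split
      · rw [PySem.Set.mem_add]
        constructor
        · rintro (h | h)
          · exact Or.inl h
          · exact Or.inr ⟨lst, ExtR.refl lst, hb, by assumption, h⟩
        · rintro (h | ⟨l, hl, he, hm, hx⟩)
          · exact Or.inl h
          · rw [hext l hl he] at hx; exact Or.inr hx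
      · constructor
        · exact Or.inl
        · rintro (h | ⟨l, hl, he, hm, hx⟩)
          · exact h
          · rw [hext l hl he] at hm; exact absurd hm (by assumption)
    · show x ∈ (if lst.length = banned.length then _ else _) ↔ _
      rw [if_neg hb]
      have hlt : lst.length < banned.length := by omega
      have inner : ∀ (ul : List String) (acc : PySem.Set (List String)),
          x ∈ ul.foldl (fun acc u => if u ∈ lst then acc else dfsA user banned fuel (lst ++ [u]) acc) acc ↔
          x ∈ acc ∨ ∃ u ∈ ul, u ∉ lst ∧ ∃ l, ExtR user (lst ++ [u]) l ∧ l.length = banned.length ∧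
            maskingA banned l = (banned.length : Int) ∧
            x = PySem.List.sorted l (fun y => y) false := by
        intro ul
        induction ul with
        | nil => intro acc; simp
        | cons u ul' IH2 =>
          intro acc
          simp only [List.foldl_cons, IH2]
          by_cases hu : u ∈ lst
          · simp only [if_pos hu]
            constructor
            · rintro (h | ⟨u', hu', h'⟩)
              · exact Or.inl h
              · exact Or.inr ⟨u', List.mem_cons_of_mem _ hu', h'⟩
            · rintro (h | ⟨u', hu', hn', h'⟩)
              · exact Or.inl h
              · rcases List.mem_cons.mp hu' with rfl | hm
                · exact absurd hu hn'
                · exact Or.inr ⟨u', hm, hn', h'⟩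
          · rw [if_neg hu, IH (lst ++ [u]) acc x (by simp; omega) (by simp; omega)]
            constructor
            · rintro ((h | ⟨l, hl⟩) | ⟨u', hu', h'⟩)
              · exact Or.inl h
              · exact Or.inr ⟨u, List.mem_cons_self, hu, l, hl⟩
              · exact Or.inr ⟨u', List.mem_cons_of_mem _ hu', h'⟩
            · rintro (h | ⟨u', hu', hn', l, hl⟩)
              · exact Or.inl (Or.inl h)
              · rcases List.mem_cons.mp hu' with rfl | hm
                · exact Or.inl (Or.inr ⟨l, hl⟩)
                · exact Or.inr ⟨u', hm, hn', l, hl⟩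
      rw [inner user acc]
      constructor
      · rintro (h | ⟨u, hu, hn, l, hl, rest⟩)
        · exact Or.inl h
        · exact Or.inr ⟨l, ExtR.step hu hn hl, rest⟩
      · rintro (h | ⟨l, hl, he, hm, hx⟩)
        · exact Or.inl h
        · cases hl with
          | refl => omega
          | step hu hn h' => exact Or.inr ⟨_, hu, hn, l, h', he, hm, hx⟩

lemma nodup_dfsA (user banned : List String) :
    ∀ (fuel : Nat) (lst : List String) (acc : PySem.Set (List String)),
    acc.Nodup → (dfsA user banned fuel lst acc).Nodup := by
  intro fuel
  induction fuel with
  | zero => intro lst acc h; exact h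
  | succ fuel IH =>
    intro lst acc h
    show ((if lst.length = banned.length then _ else _ : PySem.Set (List String))).Nodup
    split
    · split
      · exact PySem.Set.nodup_add _ _ h
      · exact h
    · show (user.foldl (fun acc u => if u ∈ lst then acc else dfsA user banned fuel (lst ++ [u]) acc) acc).Nodup
      have inner : ∀ (ul : List String) (acc : PySem.Set (List String)), acc.Nodup →
          (ul.foldl (fun acc u => if u ∈ lst then acc else dfsA user banned fuel (lst ++ [u]) acc) acc).Nodup := by
        intro ul
        induction ul with
        | nil => exact fun acc h => h
        | cons u ul' IH2 =>
          intro acc hacc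
          simp only [List.foldl_cons]
          apply IH2
          split
          · exact hacc
          · exact IH _ _ hacc
      exact inner user acc h

lemma extR_iff (user : List String) (lst l : List String) :
    ExtR user lst l ↔ ∃ t, l = lst ++ t ∧
      ∀ i (h : i < t.length), t[i] ∈ user ∧ t[i] ∉ lst ++ t.take i := by
  constructor
  · intro h
    induction h with
    | refl l => exact ⟨[], by simp⟩
    | step hu hn h ih =>
      rename_i u
      obtain ⟨t', rfl, hc⟩ := ih
      refine ⟨u :: t', by simp, ?_⟩
      intro i hi
      match i with
      | 0 => simpa using ⟨hu, hn⟩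
      | i + 1 =>
        have := hc i (by simpa using hi)
        simpa [List.append_assoc] using this
  · rintro ⟨t, rfl, hc⟩
    induction t generalizing lst with
    | nil => simpa using ExtR.refl lst
    | cons u t' ih =>
      have h0 := hc 0 (by simp)
      simp only [List.getElem_cons_zero, List.take_zero, List.append_nil] at h0
      refine ExtR.step h0.1 h0.2 ?_
      have := ih (lst ++ [u]) ?_
      · simpa [List.append_assoc] using this
      · intro i hi
        have := hc (i + 1) (by simpa using hi)
        simpa [List.append_assoc] using this

lemma pickR_iff (cs : List (List String)) : ∀ (chosen l : List String),
    PickR cs chosen l ↔ ∃ t, l = chosen ++ t ∧ ∃ hL : t.length = cs.length,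
      ∀ i (h : i < t.length), t[i] ∈ cs[i]'(by omega) ∧ t[i] ∉ chosen ++ t.take i := by
  induction cs with
  | nil =>
    intro chosen l
    constructor
    · rintro ⟨⟩; exact ⟨[], by simp⟩
    · rintro ⟨t, rfl, hL, _⟩
      have : t = [] := List.eq_nil_of_length_eq_zero hL
      subst this
      simpa using PickR.nil chosen
  | cons c cs ih =>
    intro chosen l
    constructor
    · rintro (_ | ⟨hu, hn, h⟩)
      rename_i u
      obtain ⟨t', rfl, hL, hc⟩ := (ih _ _).mp h
      refine ⟨u :: t', by simp, by simpa using hL, ?_⟩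
      intro i hi
      match i with
      | 0 => simpa using ⟨hu, hn⟩
      | i + 1 =>
        have := hc i (by simpa using hi)
        simpa [List.append_assoc] using this
    · rintro ⟨t, rfl, hL, hc⟩
      match t, hL with
      | u :: t', hL =>
        have h0 := hc 0 (by simp)
        simp only [List.getElem_cons_zero, List.take_zero, List.append_nil] at h0
        refine PickR.cons h0.1 h0.2 ((ih _ _).mpr ⟨t', by simp, by simpa using hL, ?_⟩)
        intro i hi
        have := hc (i + 1) (by simpa using hi)
        simpa [List.append_assoc] using this

def stZip (bl : List (List Char)) (i : Nat) : List (List Char × Bool) :=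
  (bl.take i).map (fun b => (b, true)) ++ (bl.drop i).map (fun b => (b, false))

lemma scan_step (bl : List (List Char)) : ∀ (i : Nat) (u : List Char), ∀ h : i < bl.length,
    CM bl[i] u → scanA u (stZip bl i) = (stZip bl (i + 1), true) := by
  induction bl with
  | nil => intro i u h; simp at h
  | cons b bs ih =>
    intro i u h hcm
    match i with
    | 0 =>
      simp only [List.getElem_cons_zero] at hcm
      simp [stZip, scanA, hcm.1, hcm.2]
    | i + 1 =>
      have hi : i < bs.length := by simpa using h
      have hcm' : CM bs[i] u := by simpa using hcm
      have e1 : stZip (b :: bs) (i + 1) = (b, true) :: stZip bs i := by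
        simp [stZip]
      have e2 : stZip (b :: bs) (i + 1 + 1) = (b, true) :: stZip bs (i + 1) := by
        simp [stZip]
      rw [e1, e2, scanA]
      rw [if_neg (by simp)]
      rw [ih i u hi hcm']

lemma fold_complete (bl : List (List Char)) :
    ∀ (t : List String) (i : Nat) (c : Int) (hL : i + t.length = bl.length),
    (∀ k (h : k < t.length), CM (bl[i + k]'(by omega)) (t[k]'h).toList) →
    t.foldl (fun st s =>
        let r := scanA s.toList st.1
        (r.1, st.2 + if r.2 then 1 else 0)) (stZip bl i, c)
      = (stZip bl bl.length, c + (t.length : Int)) := by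
  intro t
  induction t with
  | nil =>
    intro i c h _
    have hi : i = bl.length := by simpa using h
    subst hi
    simp
  | cons s t' ih =>
    intro i c h hcm
    have hlen : i < bl.length := by simp at h; omega
    have h0 : CM (bl[i]'hlen) s.toList := by simpa using hcm 0 (by simp)
    simp only [List.foldl_cons]
    rw [show (let r := scanA s.toList (stZip bl i, c).1; (r.1, (stZip bl i, c).2 + if r.2 then 1 else 0))
        = (stZip bl (i + 1), c + 1) from by
      have := scan_step bl i s.toList hlen h0
      simp [this]]
    rw [ih (i + 1) (c + 1) (by simp at h ⊢; omega) ?_]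
    · congr 1
      simp
      omega
    · intro k hk
      have := hcm (k + 1) (by simpa using hk)
      convert this using 2
      omega

lemma masking_complete (banned l : List String)
    (hlen : l.length = banned.length)
    (hm : ∀ i (h : i < l.length), CM (banned[i]'(by omega)).toList (l[i]'h).toList) :
    maskingA banned l = (banned.length : Int) := by
  unfold maskingA
  have hinit : (banned.map (fun b => (b.toList, false))) = stZip (banned.map (fun b => b.toList)) 0 := by
    simp [stZip]
  rw [hinit]
  rw [fold_complete (banned.map (fun b => b.toList)) l 0 0 (by simpa using hlen) ?_]
  · simp [hlen]
  · intro k hk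
    have := hm k hk
    simpa using this

lemma scanA_sound (u : List Char) : ∀ (st : List (List Char × Bool)),
    ((scanA u st).2 = false → (scanA u st).1 = st) ∧
    ((scanA u st).2 = true → ∃ j, ∃ hj : j < st.length, (st[j]'hj).2 = false ∧ CM (st[j]'hj).1 u ∧
      (scanA u st).1 = st.set j ((st[j]'hj).1, true)) := by
  intro st
  induction st with
  | nil => simp [scanA]
  | cons p rest ih =>
    obtain ⟨b, v⟩ := p
    rw [scanA]
    split
    · rename_i hcond
      refine ⟨by simp, ?_⟩
      intro _
      exact ⟨0, by simp, by simp [hcond.2.2], ⟨hcond.1, hcond.2.1⟩, by simp⟩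
    · simp only
      constructor
      · intro hm
        rw [ih.1 hm]
      · intro hm
        obtain ⟨j, hj, hv, hcm, hset⟩ := ih.2 hm
        exact ⟨j + 1, by simpa using hj, by simpa using hv, by simpa using hcm, by simp [hset]⟩

def MaskInv (bl : List (List Char)) (st : List (List Char × Bool)) (M : List (Nat × String)) : Prop :=
  st.map Prod.fst = bl ∧
  (M.map Prod.fst).Nodup ∧
  (∀ p ∈ M, ∃ hp : p.1 < bl.length, CM (bl[p.1]'hp) p.2.toList) ∧
  (∀ j (hj : j < st.length), ((st[j]'hj).2 = true ↔ j ∈ M.map Prod.fst))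

lemma step_inv (bl : List (List Char)) (st : List (List Char × Bool)) (M : List (Nat × String))
    (hinv : MaskInv bl st M) (u : String) :
    ∃ S1, MaskInv bl (scanA u.toList st).1 (M ++ S1) ∧
      S1.map Prod.snd = (if (scanA u.toList st).2 then [u] else []) ∧
      S1.length = (if (scanA u.toList st).2 then 1 else 0) := by
  obtain ⟨hfst, hnd, hcm, hvis⟩ := hinv
  cases hm : (scanA u.toList st).2 with
  | false =>
    refine ⟨[], ?_, by simp, by simp⟩
    rw [List.append_nil, (scanA_sound u.toList st).1 hm]
    exact ⟨hfst, hnd, hcm, hvis⟩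
  | true =>
    obtain ⟨j, hj, hv, hcmj, hset⟩ := (scanA_sound u.toList st).2 hm
    subst hfst
    have hjb : j < (List.map Prod.fst st).length := by simpa using hj
    have hblj : (st[j]'hj).1 = (List.map Prod.fst st)[j]'hjb := by simp
    have hjn : j ∉ M.map Prod.fst := fun hmem => by
      have := (hvis j hj).mpr hmem
      rw [this] at hv; exact Bool.false_ne_true hv.symm
    refine ⟨[(j, u)], ⟨?_, ?_, ?_, ?_⟩, by simp, by simp⟩
    · rw [hset, List.map_set, hblj]
      exact List.set_getElem_self hjb
    · rw [List.map_append]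
      refine hnd.append (by simp) ?_
      intro a ha hb
      simp only [List.map_cons, List.map_nil, List.mem_singleton] at hb
      subst hb
      exact hjn ha
    · intro p hp
      rcases List.mem_append.mp hp with hp | hp
      · exact hcm p hp
      · simp at hp
        subst hp
        exact ⟨hjb, hblj ▸ hcmj⟩
    · intro k hk
      have hk' : k < st.length := by
        rw [hset] at hk; simpa using hk
      by_cases hkj : k = j
      · subst hkj
        simp [hset, List.getElem_set_self]
      · have hne : j ≠ k := fun h => hkj h.symm
        simp only [hset, List.getElem_set_ne hne]
        rw [hvis k hk']
        simp [hkj]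

lemma fold_inv (bl : List (List Char)) : ∀ (t : List String) (st : List (List Char × Bool))
    (M : List (Nat × String)), MaskInv bl st M →
    ∃ st' M' S,
      t.foldl (fun st s =>
        let r := scanA s.toList st.1
        (r.1, st.2 + if r.2 then 1 else 0)) (st, (M.length : Int)) = (st', (M'.length : Int)) ∧
      MaskInv bl st' M' ∧ M' = M ++ S ∧ (S.map Prod.snd).Sublist t := by
  intro t
  induction t with
  | nil => intro st M h; exact ⟨st, M, [], by simp, h, by simp, by simp⟩
  | cons u t' ih =>
    intro st M h
    obtain ⟨S1, h1, hsnd, hlen⟩ := step_inv bl st M h u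
    obtain ⟨st', M', S', hfold, hinv', hM', hsub⟩ := ih (scanA u.toList st).1 (M ++ S1) h1
    refine ⟨st', M', S1 ++ S', ?_, hinv', by rw [hM', List.append_assoc], ?_⟩
    · rw [List.foldl_cons, ← hfold]
      congr 2
      simp only [List.length_append, hlen]
      cases (scanA u.toList st).2 <;> simp
    · cases hb : (scanA u.toList st).2 <;> rw [hb] at hsnd <;>
        simp only [List.map_append, hsnd]
      · simpa using hsub.cons u
      · simpa using hsub.cons₂ u

lemma masking_sound (banned l : List String)
    (hlen : l.length = banned.length)
    (hm : maskingA banned l = (banned.length : Int)) :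
    ∃ t : List String, t.Perm l ∧ ∃ hL : t.length = banned.length,
      ∀ i (h : i < t.length), CM (banned[i]'(by omega)).toList (t[i]'h).toList := by
  have hinv0 : MaskInv (banned.map (fun b => b.toList))
      (banned.map (fun b => (b.toList, false))) [] := by
    refine ⟨by simp, by simp, by simp, ?_⟩
    intro j hj
    have hj' : j < banned.length := by simpa using hj
    simp
  obtain ⟨st', M', S, hfold, hinv', hM', hsub⟩ :=
    fold_inv (banned.map (fun b => b.toList)) l (banned.map (fun b => (b.toList, false))) [] hinv0
  have hm' : (M'.length : Int) = (banned.length : Int) := by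
    simp only [List.length_nil, Nat.cast_zero] at hfold
    have : maskingA banned l = (M'.length : Int) := by
      unfold maskingA
      rw [hfold]
    rw [← this, hm]
  have hMb : M'.length = banned.length := by exact_mod_cast hm'
  have hsnd : M'.map Prod.snd = l := by
    rw [hM', List.nil_append] at *
    exact hsub.eq_of_length (by simp [hMb, hlen])
  -- the matched pattern indices form a permutation of range (banned.length)
  have hnodF : (M'.map Prod.fst).Nodup := hinv'.2.1
  have hcmM : ∀ p ∈ M', ∃ hp : p.1 < banned.length,
      CM ((banned.map (fun b => b.toList))[p.1]'(by simpa using hp)) p.2.toList := by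
    intro p hp
    obtain ⟨h1, h2⟩ := hinv'.2.2.1 p hp
    exact ⟨by simpa using h1, h2⟩
  have hFsub : (M'.map Prod.fst) ⊆ List.range banned.length := by
    intro a ha
    obtain ⟨p, hp, rfl⟩ := List.mem_map.mp ha
    exact List.mem_range.mpr (hcmM p hp).1
  have hFperm : (M'.map Prod.fst).Perm (List.range banned.length) :=
    (List.subperm_of_subset hnodF hFsub).perm_of_length_le (by simp [hMb])
  -- sort the matched pairs by pattern index
  set sM := PySem.List.sorted M' Prod.fst false with hsM
  have hsMperm : sM.Perm M' := PySem.List.sorted_perm M' Prod.fst false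
  have hmfp : (sM.map Prod.fst).Perm (List.range banned.length) :=
    (hsMperm.map Prod.fst).trans hFperm
  have hple : (sM.map Prod.fst).Pairwise (· ≤ ·) := PySem.List.sorted_map_key_pairwise M' Prod.fst
  have hnodsM : (sM.map Prod.fst).Nodup := ((hsMperm.map Prod.fst).nodup_iff).mpr hnodF
  have hplt : (sM.map Prod.fst).Pairwise (· < ·) :=
    (hple.and hnodsM).imp (fun h => lt_of_le_of_ne h.1 h.2)
  have hrange : sM.map Prod.fst = List.range banned.length :=
    List.Perm.eq_of_pairwise (le := (· < ·))
      (fun a b _ _ h1 h2 => absurd (h1.trans h2) (Nat.lt_irrefl a)) hplt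
      List.pairwise_lt_range hmfp
  refine ⟨sM.map Prod.snd, (hsMperm.map Prod.snd).trans (hsnd ▸ List.Perm.refl _), ?_, ?_⟩
  · have := congrArg List.length hrange
    simpa using this
  · intro i hi
    have hisM : i < sM.length := by simpa using hi
    have hfst : (sM[i]'hisM).1 = i := by
      have : (sM.map Prod.fst)[i]'(by simpa using hisM) = (List.range banned.length)[i]'(by
        rw [← hrange]; simpa using hisM) := by
        exact List.getElem_of_eq hrange _
      simpa using this
    have hmem : sM[i]'hisM ∈ M' := hsMperm.mem_iff.mp (List.getElem_mem hisM)
    obtain ⟨hp, hcm⟩ := hcmM _ hmem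
    have hcm2 : CM ((banned[(sM[i]'hisM).1]'hp).toList) ((sM[i]'hisM).2).toList := by
      simpa using hcm
    simp only [hfst] at hcm2
    have hti : (sM.map Prod.snd)[i]'hi = (sM[i]'hisM).2 := by simp
    rw [hti]
    exact hcm2


-- ===== the bridge: A's reachable sorted tuples = B's reachable sorted tuples =====

lemma sets_perm (user banned : List String) :
    (dfsA user banned (banned.length + 1) [] PySem.Set.empty).Perm
      (pickB (banned.map (fun b => (usersB user).filter (fun u => matchesB u.toList b.toList)))
        [] PySem.Set.empty) := by
  set cand := banned.map (fun b => (usersB user).filter (fun u => matchesB u.toList b.toList))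
    with hcand
  have hclen : cand.length = banned.length := by simp [hcand]
  have hcget : ∀ i (h : i < cand.length), ∀ v : String,
      v ∈ cand[i]'h ↔ (v ∈ user ∧ matchesB v.toList ((banned[i]'(by omega)).toList) = true) := by
    intro i h v
    simp only [hcand, List.getElem_map, List.mem_filter]
    exact and_congr_left' (PySem.Set.mem_ofList user v)
  apply (List.perm_ext_iff_of_nodup
    (nodup_dfsA user banned _ _ _ List.nodup_nil)
    (nodup_pickB cand [] _ List.nodup_nil)).mpr
  intro x
  rw [mem_dfsA user banned (banned.length + 1) [] _ x (by simp) (by simp), mem_pickB]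
  simp only [List.not_mem_nil, false_or]
  constructor
  · rintro ⟨l, hext, hlen, hmask, hx⟩
    obtain ⟨t, hperm, hL, hcm⟩ := masking_sound banned l hlen hmask
    have hlmem : ∀ u ∈ l, u ∈ user := by
      obtain ⟨tt, het, hct⟩ := (extR_iff user [] l).mp hext
      simp only [List.nil_append] at het
      subst het
      intro u hu
      obtain ⟨i, hi, rfl⟩ := List.mem_iff_getElem.mp hu
      exact (hct i hi).1
    have hlnd : l.Nodup := by
      obtain ⟨tt, het, hct⟩ := (extR_iff user [] l).mp hext
      simp only [List.nil_append] at het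
      subst het
      rw [nodup_iff_take]
      intro i hi
      simpa using (hct i hi).2
    have htnd : t.Nodup := (hperm.nodup_iff).mpr hlnd
    refine ⟨t, ?_, ?_⟩
    · rw [pickR_iff]
      refine ⟨t, by simp, by omega, ?_⟩
      intro i hi
      constructor
      · rw [hcget i (by omega)]
        refine ⟨hlmem _ (hperm.mem_iff.mp (List.getElem_mem hi)), ?_⟩
        rw [matchesB_iff]
        exact hcm i hi
      · simp only [List.nil_append]
        exact (nodup_iff_take t).mp htnd i hi
    · rw [hx]
      exact (PySem.List.sorted_eq_sorted_of_perm l t (fun y => y)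
        (fun a b h => h) hperm.symm).symm ▸ rfl
  · rintro ⟨l, hpick, hx⟩
    obtain ⟨t, het, hL, hct⟩ := (pickR_iff cand [] l).mp hpick
    simp only [List.nil_append] at het
    subst het
    have hmem : ∀ i (h : i < l.length), l[i] ∈ user ∧
        matchesB (l[i]'h).toList ((banned[i]'(by omega)).toList) = true := by
      intro i hi
      have := (hct i hi).1
      rw [hcget i (by omega)] at this
      exact this
    have hlen : l.length = banned.length := by omega
    refine ⟨l, ?_, hlen, ?_, hx⟩
    · rw [extR_iff]
      refine ⟨l, by simp, ?_⟩
      intro i hi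
      refine ⟨(hmem i hi).1, ?_⟩
      simpa using (hct i hi).2
    · exact masking_complete banned l hlen (fun i hi =>
        (matchesB_iff _ _).mp (hmem i hi).2)


-- ===== VERDICT (by name: the statement is the Claim_ definition above) =====
theorem solution_spec : Claim_equal_solution := by
  intro user banned _
  show solution user banned = solution_alt user banned
  unfold solution solution_alt
  show PySem.Set.len _ = PySem.Set.len _
  have h := sets_perm user banned
  simp only [PySem.Set.len]
  rw [h.length_eq]
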